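-- pv_equiv track=rewrite | github.com/Prateekkumar12345/alumna | chatbot_module/recommendation/context_analyzer.py | _extract_fields_from_message
-- ===== SOURCE A (Python) =====
-- from typing import Dict, Any, List
--
-- def _extract_fields_from_message(message: str) -> List[str]:
--     """Extract field interests from message"""
--     fields = []
--     field_mappings = {
--         "computer": "Computer Science",
--         "programming": "Computer Science",
--         "software": "Computer Science",
--         "tech": "Technology",
--         "it": "Information Technology",
--         "medical": "Medicine",
--         "doctor": "Medicine",
--         "healthcare": "Medicine",
--         "mbbs": "Medicine",
--         "business": "Business",
--         "management": "Business",
--         "mba": "Business",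
--         "finance": "Business",
--         "marketing": "Business",
--         "engineering": "Engineering",
--         "arts": "Arts",
--         "science": "Science",
--         "commerce": "Commerce",
--         "law": "Law",
--         "architecture": "Architecture"
--     }
--
--     for keyword, field in field_mappings.items():
--         if keyword in message and field not in fields:
--             fields.append(field)
--
--     return fields
-- ===== SOURCE B (Python) =====
-- from typing import Dict, Any, List
--
-- def _extract_fields_from_message(message: str) -> List[str]:
--     """Extract field interests from message"""
--     field_keywords = {
--         "Computer Science": ["computer", "programming", "software"],
--         "Technology": ["tech"],
--         "Information Technology": ["it"],
--         "Medicine": ["medical", "doctor", "healthcare", "mbbs"],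
--         "Business": ["business", "management", "mba", "finance", "marketing"],
--         "Engineering": ["engineering"],
--         "Arts": ["arts"],
--         "Science": ["science"],
--         "Commerce": ["commerce"],
--         "Law": ["law"],
--         "Architecture": ["architecture"],
--     }
--     return [field for field, keywords in field_keywords.items()
--             if any(k in message for k in keywords)]
-- ===== Notes on version B (the rewrite author's own statement) =====
-- stated objective: simpler
-- what changed: Inverted the keyword->field dict into a field->keywords dict in first-appearance order and returns a comprehension filtering fields by any(keyword in message), dropping the explicit dedup membership check.
import Mathlib
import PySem

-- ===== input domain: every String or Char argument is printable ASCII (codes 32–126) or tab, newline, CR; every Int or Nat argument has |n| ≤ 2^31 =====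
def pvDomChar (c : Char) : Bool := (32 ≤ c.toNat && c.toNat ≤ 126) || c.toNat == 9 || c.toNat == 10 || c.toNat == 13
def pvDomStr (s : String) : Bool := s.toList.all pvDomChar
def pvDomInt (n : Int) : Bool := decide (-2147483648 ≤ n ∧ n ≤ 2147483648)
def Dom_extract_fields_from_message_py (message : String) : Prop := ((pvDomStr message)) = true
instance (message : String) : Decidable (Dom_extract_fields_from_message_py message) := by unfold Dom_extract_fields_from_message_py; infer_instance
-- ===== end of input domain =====

-- B inverts the keyword->field dict into a field->keywords dict (first-appearance order) and
-- filters fields by any(keyword in message); simpler: the explicit dedup check disappears.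

-- ===== PORT A =====
-- the field_mappings dict of A, as its (keyword, field) items in insertion order
def pvFieldMappings : List (String × String) :=
  [("computer", "Computer Science"),
   ("programming", "Computer Science"),
   ("software", "Computer Science"),
   ("tech", "Technology"),
   ("it", "Information Technology"),
   ("medical", "Medicine"),
   ("doctor", "Medicine"),
   ("healthcare", "Medicine"),
   ("mbbs", "Medicine"),
   ("business", "Business"),
   ("management", "Business"),
   ("mba", "Business"),
   ("finance", "Business"),
   ("marketing", "Business"),
   ("engineering", "Engineering"),
   ("arts", "Arts"),
   ("science", "Science"),
   ("commerce", "Commerce"),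
   ("law", "Law"),
   ("architecture", "Architecture")]

def extract_fields_from_message_py (message : String) : List String :=
  pvFieldMappings.foldl
    (fun fields kf =>
      if PySem.Str.isIn kf.1 message && !(fields.contains kf.2) then fields ++ [kf.2]
      else fields)
    []

-- ===== PORT B =====
-- B's field_keywords dict, as its (field, keywords) items in insertion order
def pvFieldKeywords : List (String × List String) :=
  [("Computer Science", ["computer", "programming", "software"]),
   ("Technology", ["tech"]),
   ("Information Technology", ["it"]),
   ("Medicine", ["medical", "doctor", "healthcare", "mbbs"]),
   ("Business", ["business", "management", "mba", "finance", "marketing"]),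
   ("Engineering", ["engineering"]),
   ("Arts", ["arts"]),
   ("Science", ["science"]),
   ("Commerce", ["commerce"]),
   ("Law", ["law"]),
   ("Architecture", ["architecture"])]

def extract_fields_from_message_py_alt (message : String) : List String :=
  (pvFieldKeywords.filter (fun g => g.2.any (fun k => PySem.Str.isIn k message))).map (·.1)

-- ===== PRECONDITION & SPEC =====
def Spec_extract_fields_from_message_py (message : String) (out : List String) : Prop := out = extract_fields_from_message_py_alt message
instance (message : String) (out : List String) : Decidable (Spec_extract_fields_from_message_py message out) := by unfold Spec_extract_fields_from_message_py; infer_instance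

-- ===== CLAIM (what is proved, stated in full; the proofs are below) =====
def Claim_equal_extract_fields_from_message_py : Prop := ∀ (message : String), Dom_extract_fields_from_message_py message → Spec_extract_fields_from_message_py message (extract_fields_from_message_py message)

-- ===== LEMMAS AND PROOFS =====

-- A's loop step, abstracted over the per-keyword predicate p
def pvStep (p : String → Bool) (fields : List String) (kf : String × String) : List String :=
  if p kf.1 && !(fields.contains kf.2) then fields ++ [kf.2] else fields

-- if the field is already in the accumulator, a whole keyword group is a no-op
lemma pvGroup_mem (p : String → Bool) (f : String) (ks : List String) (fields : List String)
    (hf : f ∈ fields) :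
    (ks.map (fun k => (k, f))).foldl (pvStep p) fields = fields := by
  induction ks with
  | nil => rfl
  | cons k ks ih =>
      simp only [List.map_cons, List.foldl_cons, pvStep]
      rw [if_neg (by simp [hf]), ih]

-- a fresh field's keyword group appends the field iff some keyword matches
lemma pvGroup_fresh (p : String → Bool) (f : String) (ks : List String) (fields : List String)
    (hf : f ∉ fields) :
    (ks.map (fun k => (k, f))).foldl (pvStep p) fields
      = fields ++ (if ks.any p then [f] else []) := by
  induction ks with
  | nil => simp
  | cons k ks ih =>
      simp only [List.map_cons, List.foldl_cons, pvStep, List.any_cons]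
      by_cases hk : p k
      · rw [if_pos (by simp [hk, hf]), pvGroup_mem p f ks _ (by simp)]
        simp [hk]
      · rw [if_neg (by simp [hk]), ih]
        simp [hk]

-- chaining groups with pairwise-distinct fresh field names yields B's filter-map
lemma pvChain (p : String → Bool) (groups : List (String × List String)) (fields : List String)
    (hfresh : ∀ g ∈ groups, g.1 ∉ fields) (hnd : (groups.map (·.1)).Nodup) :
    (groups.flatMap (fun g => g.2.map (fun k => (k, g.1)))).foldl (pvStep p) fields
      = fields ++ (groups.filter (fun g => g.2.any p)).map (·.1) := by
  induction groups generalizing fields with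
  | nil => simp
  | cons g gs ih =>
      simp only [List.flatMap_cons, List.foldl_append]
      rw [pvGroup_fresh p g.1 g.2 fields (hfresh g (List.mem_cons_self ..))]
      simp only [List.map_cons, List.nodup_cons] at hnd
      rw [ih _ (by
        intro g' hg'
        have hne : g'.1 ≠ g.1 := by
          intro h; exact hnd.1 (h ▸ List.mem_map_of_mem hg')
        by_cases hp : g.2.any p <;>
          simp [hp, hfresh g' (List.mem_cons_of_mem _ hg'), hne]) hnd.2]
      by_cases hp : g.2.any p <;> simp [hp]

-- ===== VERDICT (by name: the statement is the Claim_ definition above) =====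
theorem extract_fields_from_message_py_spec : Claim_equal_extract_fields_from_message_py := by
  intro message _
  unfold Spec_extract_fields_from_message_py extract_fields_from_message_py
    extract_fields_from_message_py_alt
  have hflat : pvFieldMappings
      = pvFieldKeywords.flatMap (fun g => g.2.map (fun k => (k, g.1))) := by rfl
  have hstep : (fun (fields : List String) (kf : String × String) =>
      if PySem.Str.isIn kf.1 message && !(fields.contains kf.2) then fields ++ [kf.2]
      else fields) = pvStep (fun k => PySem.Str.isIn k message) := rfl
  rw [hflat, hstep,
    pvChain (fun k => PySem.Str.isIn k message) pvFieldKeywords [] (by simp) (by decide)]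
  simp
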